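-- pv_equiv track=rewrite | github.com/sergey-automation/ocr-rag-pipeline | scripts/make_chunks_512_from_cleaned.py | balanced_ranges
-- ===== SOURCE A (Python) =====
-- from typing import Any, Dict, List, Tuple
--
-- def balanced_ranges(word_count: int, parts: int) -> List[Tuple[int, int]]:
--     # Делим страницу на примерно равные непрерывные диапазоны слов.
--     base = word_count // parts
--     rem = word_count % parts
--     ranges: List[Tuple[int, int]] = []
--     start = 0
--     for i in range(parts):
--         size = base + (1 if i < rem else 0)
--         end = start + size
--         ranges.append((start, end))
--         start = end
--     return ranges
-- ===== SOURCE B (Python) =====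
-- def balanced_ranges(word_count: int, parts: int):
--     # Closed form: boundary before chunk i is i*base + min(i, rem).
--     base = word_count // parts
--     rem = word_count % parts
--     return [(i * base + min(i, rem), (i + 1) * base + min(i + 1, rem))
--             for i in range(parts)]
-- ===== Notes on version B (the rewrite author's own statement) =====
-- stated objective: alternative
-- what changed: Replaces the sequential loop carrying a running 'start' accumulator with a closed-form comprehension computing each boundary independently as i*base + min(i, rem).
import Mathlib
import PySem

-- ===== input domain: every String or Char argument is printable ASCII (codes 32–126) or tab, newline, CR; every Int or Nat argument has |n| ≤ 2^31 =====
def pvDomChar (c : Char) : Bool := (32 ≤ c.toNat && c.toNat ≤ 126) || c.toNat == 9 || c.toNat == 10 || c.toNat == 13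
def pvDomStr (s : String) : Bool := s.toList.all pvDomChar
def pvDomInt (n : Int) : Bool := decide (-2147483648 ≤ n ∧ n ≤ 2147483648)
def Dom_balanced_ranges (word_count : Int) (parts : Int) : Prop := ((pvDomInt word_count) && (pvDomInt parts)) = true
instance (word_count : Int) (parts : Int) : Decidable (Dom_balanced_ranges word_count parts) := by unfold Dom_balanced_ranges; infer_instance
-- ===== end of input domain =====

-- B replaces A's running-start accumulator loop with a closed-form map (alternative decomposition, same cost).


-- ===== PORT A =====
def balanced_ranges (word_count : Int) (parts : Int) : List (Int × Int) :=
  let base := PySem.Int.floordiv word_count parts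
  let rem := PySem.Int.mod word_count parts
  let st := (PySem.List.pyRange 0 parts 1).foldl
    (fun (st : List (Int × Int) × Int) i =>
      let size := base + (if i < rem then (1 : Int) else 0)
      let e := st.2 + size
      (st.1 ++ [(st.2, e)], e)) ([], 0)
  st.1

-- ===== PORT B =====
def balanced_ranges_alt (word_count : Int) (parts : Int) : List (Int × Int) :=
  let base := PySem.Int.floordiv word_count parts
  let rem := PySem.Int.mod word_count parts
  (PySem.List.pyRange 0 parts 1).map
    (fun i => (i * base + min i rem, (i + 1) * base + min (i + 1) rem))

-- ===== PRECONDITION & SPEC =====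
-- Python raises ZeroDivisionError at 'word_count // parts' when parts == 0.
def Pre_balanced_ranges (word_count : Int) (parts : Int) : Prop := parts ≠ 0
instance (word_count : Int) (parts : Int) : Decidable (Pre_balanced_ranges word_count parts) := by unfold Pre_balanced_ranges; infer_instance
def pvWitness_balanced_ranges : Int × Int := (10, 3)
def Spec_balanced_ranges (word_count : Int) (parts : Int) (out : List (Int × Int)) : Prop := out = balanced_ranges_alt word_count parts
instance (word_count : Int) (parts : Int) (out : List (Int × Int)) : Decidable (Spec_balanced_ranges word_count parts out) := by unfold Spec_balanced_ranges; infer_instance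

-- ===== CLAIM (what is proved, stated in full; the proofs are below) =====
def Claim_equal_balanced_ranges : Prop := ∀ (word_count : Int) (parts : Int), Dom_balanced_ranges word_count parts → Pre_balanced_ranges word_count parts → Spec_balanced_ranges word_count parts (balanced_ranges word_count parts)

-- ===== LEMMAS AND PROOFS =====

-- Loop invariant: folding A's body over range(n) yields B's closed-form list, with the
-- running start equal to n*base + min n rem.
lemma balanced_ranges_loop (base rem : Int) (hrem : 0 ≤ rem) (n : Nat) :
    (PySem.List.pyRange 0 (n : Int) 1).foldl
      (fun (st : List (Int × Int) × Int) i =>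
        (st.1 ++ [(st.2, st.2 + (base + (if i < rem then (1 : Int) else 0)))],
         st.2 + (base + (if i < rem then (1 : Int) else 0)))) ([], 0)
    = ((PySem.List.pyRange 0 (n : Int) 1).map
        (fun i => (i * base + min i rem, (i + 1) * base + min (i + 1) rem)),
       (n : Int) * base + min (n : Int) rem) := by
  induction n with
  | zero => simpa using hrem
  | succ n ih =>
      have h : PySem.List.pyRange 0 ((n : Int) + 1) 1
          = PySem.List.pyRange 0 (n : Int) 1 ++ [(n : Int)] :=
        PySem.List.pyRange_one_succ_right (by positivity)
      push_cast
      rw [h, List.foldl_append, List.map_append, ih]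
      simp only [List.foldl_cons, List.foldl_nil, List.map_cons, List.map_nil,
        Prod.mk.injEq, List.append_cancel_left_eq, List.cons.injEq, and_true]
      have hmin : min ((n : Int) + 1) rem
          = min (n : Int) rem + (if (n : Int) < rem then (1 : Int) else 0) := by
        split_ifs with hc <;> omega
      exact ⟨⟨trivial, by rw [hmin]; ring⟩, by rw [hmin]; ring⟩

-- ===== VERDICT (by name: the statement is the Claim_ definition above) =====
theorem balanced_ranges_spec : Claim_equal_balanced_ranges := by
  intro word_count parts _ hp
  unfold Spec_balanced_ranges balanced_ranges balanced_ranges_alt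
  dsimp only
  rcases lt_trichotomy parts 0 with h | h | h
  · rw [PySem.List.pyRange_one_eq_nil (by omega)]
    simp
  · exact absurd h hp
  · have hrem : 0 ≤ PySem.Int.mod word_count parts := PySem.Int.mod_nonneg _ h
    obtain ⟨n, hn⟩ : ∃ n : Nat, parts = (n : Int) := ⟨parts.toNat, by omega⟩
    subst hn
    rw [balanced_ranges_loop _ _ hrem n]
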